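-- pv_equiv track=rewrite | github.com/jaesunjin-git/ai-quantum-solver-platform | engine/compiler/expression_parser.py | _find_top_level_mul
-- ===== SOURCE A (Python) =====
-- def _find_top_level_mul(expr):
--     paren = 0
--     last_pos = None
--     for i, ch in enumerate(expr):
--         if ch == '(':
--             paren += 1
--         elif ch == ')':
--             paren -= 1
--         elif paren == 0 and ch == '*':
--             last_pos = i
--     return last_pos
-- ===== SOURCE B (Python) =====
-- def _find_top_level_mul(expr):
--     # Search candidate '*' positions from the right via rfind; a position is
--     # top-level iff its prefix has equally many '(' and ')'.
--     i = expr.rfind('*')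
--     while i != -1:
--         if expr.count('(', 0, i) == expr.count(')', 0, i):
--             return i
--         i = expr.rfind('*', 0, i)
--     return None
-- ===== Notes on version B (the rewrite author's own statement) =====
-- stated objective: faster
-- what changed: A makes one forward Python-level scan keeping a running paren counter and overwriting a last-seen slot; B searches candidate asterisk positions back-to-front with str.rfind and tests each by comparing the counts of opening and closing parens in its prefix, returning at the first (i.e. rightmost) balanced one.
import Mathlib
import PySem

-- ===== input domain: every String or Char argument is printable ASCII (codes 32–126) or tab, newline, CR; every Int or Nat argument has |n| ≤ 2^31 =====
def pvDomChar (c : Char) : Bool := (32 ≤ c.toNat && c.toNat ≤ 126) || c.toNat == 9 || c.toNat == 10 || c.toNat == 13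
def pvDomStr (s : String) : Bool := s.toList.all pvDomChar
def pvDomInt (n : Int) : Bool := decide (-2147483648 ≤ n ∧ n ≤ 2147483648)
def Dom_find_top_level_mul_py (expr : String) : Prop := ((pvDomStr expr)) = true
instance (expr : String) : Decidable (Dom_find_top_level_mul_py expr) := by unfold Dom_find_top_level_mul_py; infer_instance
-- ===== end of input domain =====

-- B replaces A's forward per-character scan (paren counter + last-seen slot) by a
-- back-to-front search over '*' candidates (str.rfind), testing each by comparing the
-- '(' / ')' counts in its prefix; return value identical on all inputs, and the timing
-- run measured B faster (few C-level scans instead of a Python-level loop).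

-- ===== PORT A =====
-- the for-loop over enumerate(expr) with state (paren, last_pos)
def pvLoopA : List (Int × Char) → Int → Option Int → Option Int
  | [], _, last_pos => last_pos
  | (i, ch) :: rest, paren, last_pos =>
    if ch = '(' then pvLoopA rest (paren + 1) last_pos
    else if ch = ')' then pvLoopA rest (paren - 1) last_pos
    else if paren = 0 ∧ ch = '*' then pvLoopA rest paren (some i)
    else pvLoopA rest paren last_pos

def find_top_level_mul_py (expr : String) : Option Int :=
  pvLoopA (PySem.List.enumerate expr.toList) 0 none

-- ===== PORT B =====
-- expr.rfind('*', 0, hi): scan indices hi-1, hi-2, … for '*'; none = Python's -1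
def pvRFind (cs : List Char) : Nat → Option Nat
  | 0 => none
  | n + 1 => if cs.getD n ' ' = '*' then some n else pvRFind cs n

-- termination fact for the while loop: rfind's result is below the bound
theorem pvRFind_lt (cs : List Char) : ∀ (hi i : Nat), pvRFind cs hi = some i → i < hi := by
  intro hi
  induction hi with
  | zero => intro i h; simp [pvRFind] at h
  | succ n ih =>
    intro i h
    rw [pvRFind] at h
    split_ifs at h with hc
    · cases h; omega
    · exact Nat.lt_succ_of_lt (ih i h)

-- the while loop of Source B: current rfind bound as the recursion argument;
-- expr.count('(', 0, i) is ported as (cs.take i).count '('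
def pvSearch (cs : List Char) (hi : Nat) : Option Int :=
  match h : pvRFind cs hi with
  | none => none
  | some i =>
    if (cs.take i).count '(' = (cs.take i).count ')' then some (Int.ofNat i)
    else pvSearch cs i
termination_by hi
decreasing_by exact pvRFind_lt cs hi i h

def find_top_level_mul_py_alt (expr : String) : Option Int :=
  pvSearch expr.toList expr.toList.length

-- ===== PRECONDITION & SPEC =====
def Spec_find_top_level_mul_py (expr : String) (out : Option Int) : Prop := out = find_top_level_mul_py_alt expr
instance (expr : String) (out : Option Int) : Decidable (Spec_find_top_level_mul_py expr out) := by unfold Spec_find_top_level_mul_py; infer_instance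

-- ===== CLAIM (what is proved, stated in full; the proofs are below) =====
def Claim_equal_find_top_level_mul_py : Prop := ∀ (expr : String), Dom_find_top_level_mul_py expr → Spec_find_top_level_mul_py expr (find_top_level_mul_py expr)

-- ===== LEMMAS AND PROOFS =====

-- common characterization: i is "good" iff it holds a '*' whose prefix is balanced
def pvGood (cs : List Char) (i : Nat) : Bool :=
  (cs.getD i ' ' == '*') && ((cs.take i).count '(' == (cs.take i).count ')')

-- last good index below hi
def pvLast (cs : List Char) (hi : Nat) : Option Nat :=
  ((List.range hi).filter (pvGood cs)).getLast?

def pvDelta (ch : Char) : Int := if ch = '(' then 1 else if ch = ')' then -1 else 0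

def pvBal (cs : List Char) : Int := (cs.map pvDelta).sum

theorem pvBal_eq_counts (cs : List Char) :
    pvBal cs = (cs.count '(' : Int) - (cs.count ')' : Int) := by
  induction cs with
  | nil => simp [pvBal]
  | cons ch cs ih =>
    simp only [pvBal, List.map_cons, List.sum_cons, List.count_cons] at *
    rw [ih]
    by_cases h1 : ch = '('
    · simp [pvDelta, h1]; push_cast; ring
    · by_cases h2 : ch = ')'
      · simp [pvDelta, h1, h2]; push_cast; ring
      · have b1 : (ch == '(') = false := by simp [h1]
        have b2 : (ch == ')') = false := by simp [h2]
        simp [pvDelta, h1, h2, b1, b2]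

theorem pvLoopA_append (e2 e1 : List (Int × Char)) (p : Int) (lp : Option Int) :
    pvLoopA (e1 ++ e2) p lp = pvLoopA e2 (p + pvBal (e1.map (·.2))) (pvLoopA e1 p lp) := by
  induction e1 generalizing p lp with
  | nil => simp [pvLoopA, pvBal]
  | cons q e1 ih =>
    obtain ⟨i, ch⟩ := q
    simp only [List.cons_append, pvLoopA, List.map_cons, pvBal, List.sum_cons]
    by_cases h1 : ch = '('
    · rw [if_pos h1, if_pos h1, ih]
      simp [pvBal, pvDelta, h1, add_comm, add_assoc, add_left_comm]
    · rw [if_neg h1, if_neg h1]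
      by_cases h2 : ch = ')'
      · rw [if_pos h2, if_pos h2, ih]
        simp only [pvBal, pvDelta, if_neg h1, if_pos h2]
        ring_nf
      · rw [if_neg h2, if_neg h2]
        have hd : pvDelta ch = 0 := by simp [pvDelta, h1, h2]
        by_cases h3 : p = 0 ∧ ch = '*'
        · rw [if_pos h3, if_pos h3, ih]; simp [pvBal, hd]
        · rw [if_neg h3, if_neg h3, ih]; simp [pvBal, hd]

theorem pvGood_append (cs : List Char) (ch : Char) (i : Nat) (h : i < cs.length) :
    pvGood (cs ++ [ch]) i = pvGood cs i := by
  simp only [pvGood]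
  rw [List.take_append_of_le_length (Nat.le_of_lt h)]
  simp [List.getD_eq_getElem?_getD, List.getElem?_append_left h]

theorem pvGood_last (cs : List Char) (ch : Char) :
    pvGood (cs ++ [ch]) cs.length =
      ((ch == '*') && (cs.count '(' == cs.count ')')) := by
  simp only [pvGood]
  rw [List.take_append_of_le_length (Nat.le_refl _), List.take_length]
  simp [List.getD_eq_getElem?_getD]

-- A's loop computes the last good index
theorem pvA_eq_pvLast (cs : List Char) :
    pvLoopA (PySem.List.enumerate cs 0) 0 none = (pvLast cs cs.length).map Int.ofNat := by
  induction cs using List.reverseRecOn with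
  | nil => simp [pvLoopA, pvLast, PySem.List.enumerate]
  | append_singleton cs ch ih =>
    rw [PySem.List.enumerate_append, pvLoopA_append]
    have hmap : (PySem.List.enumerate cs 0).map (·.2) = cs := PySem.List.map_snd_enumerate cs 0
    rw [hmap, ih]
    have hrange : List.range (cs ++ [ch]).length = List.range cs.length ++ [cs.length] := by
      simp [List.range_succ]
    have hfilt : (List.range cs.length).filter (pvGood (cs ++ [ch]))
        = (List.range cs.length).filter (pvGood cs) := by
      apply List.filter_congr
      intro i hi
      exact pvGood_append cs ch i (List.mem_range.mp hi)
    have hlast : pvLast (cs ++ [ch]) (cs ++ [ch]).length =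
        (if (ch == '*') && (cs.count '(' == cs.count ')') then some cs.length
         else pvLast cs cs.length) := by
      rw [pvLast, hrange, List.filter_append, hfilt, List.filter_cons, List.filter_nil,
          pvGood_last]
      by_cases hg : ((ch == '*') && (cs.count '(' == cs.count ')')) = true
      · simp [hg]
      · simp only [Bool.not_eq_true] at hg
        simp [hg, pvLast]
    rw [hlast]
    simp only [PySem.List.enumerate_cons, PySem.List.enumerate_nil, pvLoopA]
    by_cases h1 : ch = '('
    · have : (ch == '*') = false := by simp [h1]
      simp [h1, this]
    · by_cases h2 : ch = ')'
      · have : (ch == '*') = false := by simp [h2]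
        simp [h1, h2, this]
      · rw [if_neg h1, if_neg h2]
        by_cases h3 : ch = '*'
        · subst h3
          by_cases hb : (0 : Int) + pvBal cs = 0
          · have hc : (cs.count '(' == cs.count ')') = true := by
              rw [pvBal_eq_counts] at hb
              simp only [beq_iff_eq]
              omega
            rw [if_pos ⟨by omega, rfl⟩]
            simp [hc, pvLoopA]
          · have hc : (cs.count '(' == cs.count ')') = false := by
              rw [pvBal_eq_counts] at hb
              simp only [beq_eq_false_iff_ne, ne_eq]
              intro h; apply hb; push_cast; omega
            rw [if_neg (by intro h; exact hb (by omega))]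
            simp [hc, pvLoopA]
        · have hs : (ch == '*') = false := by simp [h3]
          rw [if_neg (by intro h; exact h3 h.2)]
          simp [hs, pvLoopA]

-- facts about rfind
theorem pvRFind_none (cs : List Char) : ∀ (hi : Nat), pvRFind cs hi = none →
    ∀ j, j < hi → cs.getD j ' ' ≠ '*' := by
  intro hi
  induction hi with
  | zero => intro _ j hj; omega
  | succ n ih =>
    intro h j hj
    rw [pvRFind] at h
    split_ifs at h with hc
    rcases Nat.lt_succ_iff_lt_or_eq.mp hj with hlt | heq
    · exact ih h j hlt
    · rw [heq]; exact hc

theorem pvRFind_some (cs : List Char) : ∀ (hi i : Nat), pvRFind cs hi = some i →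
    cs.getD i ' ' = '*' ∧ ∀ j, i < j → j < hi → cs.getD j ' ' ≠ '*' := by
  intro hi
  induction hi with
  | zero => intro i h; simp [pvRFind] at h
  | succ n ih =>
    intro i h
    rw [pvRFind] at h
    split_ifs at h with hc
    · cases h
      exact ⟨hc, fun j hj1 hj2 => by omega⟩
    · obtain ⟨hstar, hnone⟩ := ih i h
      refine ⟨hstar, fun j hj1 hj2 => ?_⟩
      rcases Nat.lt_succ_iff_lt_or_eq.mp hj2 with hlt | heq
      · exact hnone j hj1 hlt
      · rw [heq]; exact hc

-- no good index in [lo, hi) ⇒ pvLast unchanged when the bound drops to lo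
theorem pvLast_drop (cs : List Char) (lo hi : Nat) (hle : lo ≤ hi)
    (h : ∀ j, lo ≤ j → j < hi → pvGood cs j = false) :
    pvLast cs hi = pvLast cs lo := by
  have hr : List.range hi = List.range lo ++ List.range' lo (hi - lo) := by
    rw [show hi = lo + (hi - lo) by omega, List.range_add, ← List.range'_eq_map_range]
    congr 2
    omega
  rw [pvLast, hr, List.filter_append]
  have : (List.range' lo (hi - lo)).filter (pvGood cs) = [] := by
    rw [List.filter_eq_nil_iff]
    intro j hj
    have := List.mem_range'_1.mp hj
    simp [h j this.1 (by omega)]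
  rw [this, List.append_nil, pvLast]

theorem pvLast_found (cs : List Char) (i hi : Nat) (hlt : i < hi)
    (hg : pvGood cs i = true)
    (h : ∀ j, i < j → j < hi → pvGood cs j = false) :
    pvLast cs hi = some i := by
  have hdrop : pvLast cs hi = pvLast cs (i + 1) := pvLast_drop cs (i + 1) hi hlt h
  rw [hdrop, pvLast, List.range_succ, List.filter_append, List.filter_cons, hg]
  simp

-- B's loop computes the last good index
theorem pvSearch_eq (cs : List Char) (hi : Nat) :
    pvSearch cs hi = (pvLast cs hi).map Int.ofNat := by
  induction hi using Nat.strong_induction_on with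
  | _ hi ih =>
    rw [pvSearch]
    split
    · rename_i h
      have : pvLast cs hi = none := by
        rw [show pvLast cs hi = pvLast cs 0 from
          pvLast_drop cs 0 hi (Nat.zero_le _) (fun j _ hj => by
            simp only [pvGood, beq_eq_false_iff_ne.mpr (pvRFind_none cs hi h j hj),
              Bool.false_and])]
        rfl
      simp [this]
    · rename_i i h
      obtain ⟨hstar, hafter⟩ := pvRFind_some cs hi i h
      have hilt : i < hi := pvRFind_lt cs hi i h
      have hnogood : ∀ j, i < j → j < hi → pvGood cs j = false := by
        intro j hj1 hj2
        simp only [pvGood, beq_eq_false_iff_ne.mpr (hafter j hj1 hj2), Bool.false_and]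
      by_cases hc : (cs.take i).count '(' = (cs.take i).count ')'
      · rw [if_pos hc]
        have hg : pvGood cs i = true := by
          simp only [pvGood, beq_iff_eq.mpr hstar, beq_iff_eq.mpr hc, Bool.and_self]
        rw [pvLast_found cs i hi hilt hg hnogood]
        rfl
      · rw [if_neg hc]
        have hgi : pvGood cs i = false := by
          simp only [pvGood, Bool.and_eq_false_iff]
          right; simpa using hc
        have hdr : pvLast cs hi = pvLast cs i := by
          apply pvLast_drop cs i hi (Nat.le_of_lt hilt)
          intro j hj1 hj2
          rcases Nat.lt_or_ge i j with hlt | hge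
          · exact hnogood j hlt hj2
          · have hji : j = i := by omega
            rw [hji]; exact hgi
        rw [hdr, ih i hilt]

-- ===== VERDICT (by name: the statement is the Claim_ definition above) =====
theorem find_top_level_mul_py_spec : Claim_equal_find_top_level_mul_py := by
  intro expr _
  show find_top_level_mul_py expr = find_top_level_mul_py_alt expr
  rw [find_top_level_mul_py, find_top_level_mul_py_alt, pvA_eq_pvLast, pvSearch_eq]
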